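-- pv_equiv track=rewrite | github.com/prog-romero/Prototype_sendfd | benchmarks/micro/micro-bench-forward-tcp-vs-migration/client/run_combined_sweep.py | build_alternating_schedule
-- ===== SOURCE A (Python) =====
-- def build_alternating_schedule(fn_a: str, fn_b: str, n_total: int, first_target: str) -> list[str]:
--     if n_total <= 0:
--         return []
--
--     schedule: list[str] = []
--     current = first_target
--     for _ in range(n_total):
--         schedule.append(current)
--         current = fn_a if current == fn_b else fn_b
--     return schedule
-- ===== SOURCE B (Python) =====
-- def build_alternating_schedule(fn_a: str, fn_b: str, n_total: int, first_target: str) -> list[str]: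
--     cycle = [fn_a, fn_b] if first_target == fn_b else [fn_b, fn_a]
--     return ([first_target] + cycle * (n_total // 2))[:n_total]
-- ===== Notes on version B (the rewrite author's own statement) =====
-- stated objective: alternative
-- what changed: Replaces A's per-element loop that toggles a `current` state with whole-list construction: the first target followed by the repeated two-element cycle, truncated to n_total (list repetition + slice instead of iteration).
import Mathlib
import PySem

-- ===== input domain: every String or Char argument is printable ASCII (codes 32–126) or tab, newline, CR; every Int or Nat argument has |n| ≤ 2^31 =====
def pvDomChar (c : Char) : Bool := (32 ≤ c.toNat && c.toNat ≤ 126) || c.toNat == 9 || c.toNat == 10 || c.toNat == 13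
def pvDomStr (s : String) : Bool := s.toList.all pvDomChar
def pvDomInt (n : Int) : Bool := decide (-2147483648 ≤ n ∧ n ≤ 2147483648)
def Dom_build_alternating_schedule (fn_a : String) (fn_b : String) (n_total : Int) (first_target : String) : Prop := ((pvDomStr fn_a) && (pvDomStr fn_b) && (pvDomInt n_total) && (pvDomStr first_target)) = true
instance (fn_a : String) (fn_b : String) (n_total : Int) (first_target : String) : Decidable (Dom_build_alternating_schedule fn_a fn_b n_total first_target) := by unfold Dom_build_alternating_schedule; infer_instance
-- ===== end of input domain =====

-- B builds the schedule by list repetition (head + repeated two-element cycle, truncated) instead of A's element-by-element loop toggling `current` (alternative decomposition).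
-- ===== PORT A =====
-- A's for-loop: fuel = remaining iterations, state = (schedule, current)
def pvLoopA (fn_a : String) (fn_b : String) : Nat → List String → String → List String
  | 0, schedule, _ => schedule
  | k+1, schedule, current =>
      pvLoopA fn_a fn_b k (schedule ++ [current]) (if current == fn_b then fn_a else fn_b)

def build_alternating_schedule (fn_a : String) (fn_b : String) (n_total : Int) (first_target : String) : List String :=
  if n_total ≤ 0 then []
  else pvLoopA fn_a fn_b n_total.toNat [] first_target

-- ===== PORT B =====
-- `cycle * k` (Python list repetition; empty for k ≤ 0, as in Python)
def pvListMul (xs : List String) (k : Int) : List String :=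
  (List.replicate k.toNat xs).flatten

def build_alternating_schedule_alt (fn_a : String) (fn_b : String) (n_total : Int) (first_target : String) : List String :=
  let cycle := if first_target == fn_b then [fn_a, fn_b] else [fn_b, fn_a]
  PySem.List.slice ([first_target] ++ pvListMul cycle (PySem.Int.floordiv n_total 2)) none (some n_total)

-- ===== PRECONDITION & SPEC =====
def Spec_build_alternating_schedule (fn_a : String) (fn_b : String) (n_total : Int) (first_target : String) (out : List String) : Prop := out = build_alternating_schedule_alt fn_a fn_b n_total first_target
instance (fn_a : String) (fn_b : String) (n_total : Int) (first_target : String) (out : List String) : Decidable (Spec_build_alternating_schedule fn_a fn_b n_total first_target out) := by unfold Spec_build_alternating_schedule; infer_instance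

-- ===== CLAIM =====
def Claim_equal_build_alternating_schedule : Prop := ∀ (fn_a : String) (fn_b : String) (n_total : Int) (first_target : String), Dom_build_alternating_schedule fn_a fn_b n_total first_target → Spec_build_alternating_schedule fn_a fn_b n_total first_target (build_alternating_schedule fn_a fn_b n_total first_target)

-- ===== LEMMAS AND PROOFS =====

-- A's loop step: the next value of `current`
def stepT (fn_a fn_b cur : String) : String := if cur == fn_b then fn_a else fn_b

-- the list A's loop emits from state `cur` in k iterations
def gA (fn_a fn_b : String) : Nat → String → List String
  | 0, _ => []
  | k+1, cur => cur :: gA fn_a fn_b k (stepT fn_a fn_b cur)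

-- the alternating list s, o, s, o, …
def altL : Nat → String → String → List String
  | 0, _, _ => []
  | k+1, s, o => s :: altL k o s

theorem pvLoopA_eq (fa fb : String) : ∀ (k : Nat) (sched : List String) (cur : String),
    pvLoopA fa fb k sched cur = sched ++ gA fa fb k cur := by
  intro k
  induction k with
  | zero => intro sched cur; simp [pvLoopA, gA]
  | succ k ih =>
    intro sched cur
    simp [pvLoopA, gA, ih, stepT]

theorem gA_altL (fa fb : String) : ∀ (k : Nat) (s o : String),
    stepT fa fb s = o → stepT fa fb o = s → gA fa fb k s = altL k s o := by
  intro k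
  induction k with
  | zero => intro s o _ _; simp [gA, altL]
  | succ k ih =>
    intro s o hso hos
    simp only [gA, altL, hso]
    exact congrArg _ (ih o s hos hso)

-- truncating the repeated two-element cycle gives the alternating list
theorem take_flatten_replicate (s o : String) : ∀ (m k : Nat), k ≤ 2 * m →
    (List.flatten (List.replicate m [s, o])).take k = altL k s o := by
  intro m
  induction m with
  | zero => intro k hk; interval_cases k; simp [altL]
  | succ m ih =>
    intro k hk
    match k with
    | 0 => simp [altL]
    | 1 => simp [List.replicate_succ, altL]
    | j + 2 =>
      simp only [List.replicate_succ, List.flatten_cons, List.cons_append,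
        List.take_succ_cons, altL]
      exact congrArg _ (congrArg _ (ih j (by omega)))

-- ===== VERDICT =====
theorem build_alternating_schedule_spec : Claim_equal_build_alternating_schedule := by
  intro fa fb n ft _
  unfold Spec_build_alternating_schedule build_alternating_schedule build_alternating_schedule_alt
  have hfd : PySem.Int.floordiv n 2 = n / 2 := PySem.Int.floordiv_eq_ediv_of_pos (by norm_num)
  by_cases hn : n ≤ 0
  · -- A returns []; B's truncation to n ≤ 0 is empty too
    have hrep : (PySem.Int.floordiv n 2).toNat = 0 := by rw [hfd]; omega
    simp only [hn, if_true, pvListMul, hrep, List.replicate_zero, List.flatten_nil,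
      List.append_nil]
    rcases eq_or_lt_of_le hn with h0 | hneg
    · subst h0
      rw [PySem.List.slice_to _ le_rfl]
      simp
    · have hk : 0 < (-n).toNat := by omega
      have hne : n = -(((-n).toNat : Nat) : Int) := by omega
      rw [hne, PySem.List.slice_to_neg_natCast _ _ hk]
      simp [List.take_eq_nil_iff]
      omega
  · -- n ≥ 1
    simp only [hn, if_false, pvListMul]
    rw [pvLoopA_eq, List.nil_append,
      PySem.List.slice_to _ (by omega : (0:Int) ≤ n)]
    set s := if ft == fb then fa else fb with hs
    set o := if s == fb then fa else fb with ho
    have hstep1 : stepT fa fb ft = s := rfl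
    have hstep2 : stepT fa fb s = o := rfl
    have hstep3 : stepT fa fb o = s := by
      unfold stepT at *
      by_cases h1 : fa = fb <;> by_cases h2 : ft = fb <;> simp_all
    have hcyc : (if ft == fb then [fa, fb] else [fb, fa]) = [s, o] := by
      by_cases h2 : ft = fb
      · by_cases h1 : fa = fb <;> simp [hs, ho, h1, h2]
      · simp [hs, ho, h2]
    obtain ⟨t, ht⟩ : ∃ t : Nat, n.toNat = t + 1 := ⟨n.toNat - 1, by omega⟩
    have hm : (PySem.Int.floordiv n 2).toNat = n.toNat / 2 := by rw [hfd]; omega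
    rw [hcyc, hm, ht]
    simp only [gA, hstep1, List.cons_append, List.nil_append, List.take_succ_cons]
    rw [gA_altL fa fb t s o hstep2 hstep3,
      take_flatten_replicate s o ((t+1)/2) t (by omega)]
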